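-- pv_equiv track=rewrite | github.com/shljessie/Model-Optimizer | modelopt/torch/puzzletron/bypass_distillation/bypass_utils.py | get_distributed_modules_ownership
-- ===== SOURCE A (Python) =====
-- def get_distributed_modules_ownership(module_count: int, world_size: int) -> list[int]:
--     """Map module (block) indices to GPU ranks for pipeline-parallel distribution."""
--     modules_process_ownership: list[int] = []
--
--     for i in range(world_size):
--         num_modules_for_process = module_count // world_size
--         if i < module_count % world_size:
--             num_modules_for_process += 1
--
--         modules_process_ownership.extend([i] * num_modules_for_process)
--
--     return modules_process_ownership
-- ===== SOURCE B (Python) =====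
-- def get_distributed_modules_ownership(module_count: int, world_size: int) -> list[int]:
--     """Map module (block) indices to GPU ranks for pipeline-parallel distribution."""
--     if world_size <= 0:
--         return []
--     base, r = divmod(module_count, world_size)
--     cut = r * (base + 1)
--     return [j // (base + 1) if j < cut else r + (j - cut) // base
--             for j in range(module_count)]
-- ===== Notes on version B (the rewrite author's own statement) =====
-- stated objective: faster
-- what changed: Instead of A's rank-by-rank emission of blocks via repeated list multiplication and extend, B computes divmod(module_count, world_size) once and maps each module index directly to its owning rank with a closed-form floor-division formula in a single list comprehension.
import Mathlib
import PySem

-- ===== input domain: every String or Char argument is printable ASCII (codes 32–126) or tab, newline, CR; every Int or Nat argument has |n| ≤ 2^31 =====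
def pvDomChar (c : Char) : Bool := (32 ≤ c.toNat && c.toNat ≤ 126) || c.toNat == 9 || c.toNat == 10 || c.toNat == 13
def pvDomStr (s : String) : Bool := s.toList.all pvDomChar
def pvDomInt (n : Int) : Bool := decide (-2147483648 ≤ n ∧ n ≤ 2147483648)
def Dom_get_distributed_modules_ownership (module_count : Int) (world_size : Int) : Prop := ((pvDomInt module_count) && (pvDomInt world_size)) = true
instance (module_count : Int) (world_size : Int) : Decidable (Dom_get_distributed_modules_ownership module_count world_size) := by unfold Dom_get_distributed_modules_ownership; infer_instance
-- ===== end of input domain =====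

-- B replaces A's rank-by-rank block emission with one per-module closed-form owner computation (a timing run measured B faster by a constant factor).

-- ===== PORT A =====
-- literal transliteration of A: for i in range(world_size): … extend([i] * num)
def get_distributed_modules_ownership (module_count : Int) (world_size : Int) : List Int :=
  (PySem.List.pyRange 0 world_size 1).foldl
    (fun acc i =>
      let num := PySem.Int.floordiv module_count world_size +
        (if i < PySem.Int.mod module_count world_size then 1 else 0)
      acc ++ PySem.List.pyRepeat [i] num) []

-- ===== PORT B =====
-- literal transliteration of Source B: guard world_size <= 0, divmod once, map over range(module_count)
def get_distributed_modules_ownership_alt (module_count : Int) (world_size : Int) : List Int :=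
  if world_size ≤ 0 then []
  else
    let base := PySem.Int.floordiv module_count world_size
    let r := PySem.Int.mod module_count world_size
    let cut := r * (base + 1)
    (PySem.List.pyRange 0 module_count 1).map
      (fun j => if j < cut then PySem.Int.floordiv j (base + 1)
                else r + PySem.Int.floordiv (j - cut) base)

-- ===== PRECONDITION & SPEC =====
def Spec_get_distributed_modules_ownership (module_count : Int) (world_size : Int) (out : List Int) : Prop := out = get_distributed_modules_ownership_alt module_count world_size
instance (module_count : Int) (world_size : Int) (out : List Int) : Decidable (Spec_get_distributed_modules_ownership module_count world_size out) := by unfold Spec_get_distributed_modules_ownership; infer_instance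

-- ===== CLAIM (what is proved, stated in full; the proofs are below) =====
def Claim_equal_get_distributed_modules_ownership : Prop := ∀ (module_count : Int) (world_size : Int), Dom_get_distributed_modules_ownership module_count world_size → Spec_get_distributed_modules_ownership module_count world_size (get_distributed_modules_ownership module_count world_size)

-- ===== LEMMAS AND PROOFS =====

def pvOwnerN (q r j : ℕ) : ℕ :=
  if j < r * (q + 1) then j / (q + 1) else r + (j - r * (q + 1)) / q

lemma pv_flatMap_map {α β γ : Type} (l : List α) (f : α → β) (g : β → List γ) :
    (l.map f).flatMap g = l.flatMap (fun x => g (f x)) := by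
  induction l with
  | nil => simp
  | cons a t ih => simp [ih]

lemma pv_owner_small0 (q j : ℕ) (hj : j < q) : pvOwnerN q 0 j = 0 := by
  unfold pvOwnerN
  rw [if_neg (by omega)]
  simp [Nat.div_eq_of_lt hj]

lemma pv_owner_small (q r₀ j : ℕ) (hj : j < q + 1) : pvOwnerN q (r₀ + 1) j = 0 := by
  unfold pvOwnerN
  rw [if_pos (by nlinarith)]
  exact Nat.div_eq_of_lt hj

lemma pv_owner_shift0 (q k : ℕ) (hq : 0 < q) : pvOwnerN q 0 (q + k) = pvOwnerN q 0 k + 1 := by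
  unfold pvOwnerN
  rw [if_neg (by omega), if_neg (by omega)]
  simp only [Nat.zero_mul, Nat.sub_zero, Nat.zero_add]
  have : q + k = k + q := by omega
  rw [this, Nat.add_div_right _ hq]
lemma pv_owner_shift (q r₀ k : ℕ) : pvOwnerN q (r₀ + 1) (q + 1 + k) = pvOwnerN q r₀ k + 1 := by
  unfold pvOwnerN
  by_cases h : k < r₀ * (q + 1)
  · rw [if_pos h, if_pos (by nlinarith)]
    have : q + 1 + k = k + (q + 1) := by omega
    rw [this, Nat.add_div_right _ (by omega)]
  · rw [if_neg h, if_neg (by push Not at h; nlinarith)]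
    have h2 : q + 1 + k - (r₀ + 1) * (q + 1) = k - r₀ * (q + 1) := by
      have : (r₀ + 1) * (q + 1) = r₀ * (q + 1) + (q + 1) := by ring
      omega
    rw [h2]
    omega

lemma pv_map_owner_zero (q r c : ℕ) (h : ∀ j < c, pvOwnerN q r j = 0) :
    (List.range c).map (pvOwnerN q r) = List.replicate c 0 := by
  have h1 : (List.range c).map (pvOwnerN q r) = (List.range c).map (fun _ => 0) :=
    List.map_congr_left (fun j hj => h j (List.mem_range.mp hj))
  rw [h1]
  simp [List.map_const']

lemma pv_blocks_eq (q : ℕ) : ∀ (w r : ℕ), r ≤ w →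
    (List.range w).flatMap (fun i => List.replicate (q + if i < r then 1 else 0) i)
  = (List.range (q * w + r)).map (pvOwnerN q r) := by
  intro w
  induction w with
  | zero =>
    intro r hr
    interval_cases r
    simp
  | succ w ih =>
    intro r hr
    rw [List.range_succ_eq_map, List.flatMap_cons, pv_flatMap_map]
    rcases r with _ | r₀
    · -- r = 0: every rank gets exactly q modules
      simp only [Nat.not_lt_zero, if_false, Nat.add_zero]
      have e1 : (fun i => List.replicate q (Nat.succ i)) =
          (fun i => (List.replicate q i).map Nat.succ) := by
        funext i; simp
      have ih0 : (List.range w).flatMap (List.replicate q)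
          = (List.range (q * w)).map (pvOwnerN q 0) := by
        have := ih 0 (Nat.zero_le w)
        simpa using this
      rw [e1, ← List.map_flatMap, ih0]
      have e2 : q * (w + 1) = q + q * w := by ring
      conv_rhs => rw [e2, List.range_add, List.map_append, List.map_map]
      congr 1
      · exact (pv_map_owner_zero q 0 q (fun j hj => pv_owner_small0 q j hj)).symm
      · rw [List.map_map]
        refine List.map_congr_left (fun k hk => ?_)
        have hk' : k < q * w := List.mem_range.mp hk
        have hq : 0 < q := by
          rcases Nat.eq_zero_or_pos q with h | h
          · subst h; simp at hk'
          · exact h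
        simp [Function.comp, pv_owner_shift0 q k hq]
    · -- r = r₀ + 1: the first rank gets q+1 modules
      simp only [Nat.succ_lt_succ_iff, Nat.zero_lt_succ, if_true]
      have e1 : (fun i => List.replicate (q + if i < r₀ then 1 else 0) (Nat.succ i)) =
          (fun i => (List.replicate (q + if i < r₀ then 1 else 0) i).map Nat.succ) := by
        funext i; simp
      rw [e1, ← List.map_flatMap, ih r₀ (by omega)]
      have e2 : q * (w + 1) + (r₀ + 1) = (q + 1) + (q * w + r₀) := by ring
      conv_rhs => rw [e2, List.range_add, List.map_append, List.map_map]
      congr 1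
      · exact (pv_map_owner_zero q (r₀+1) (q+1) (fun j hj => pv_owner_small q r₀ j hj)).symm
      · rw [List.map_map]
        refine List.map_congr_left (fun k hk => ?_)
        simp [Function.comp, pv_owner_shift q r₀ k]

-- main-case bridge over Int: both ports reduce to the Nat-level statement pv_blocks_eq
lemma pv_pyRange_flatMap (w : ℕ) (g : ℤ → List ℤ) :
    (PySem.List.pyRange 0 (w:ℤ) 1).flatMap g = (List.range w).flatMap (fun (i : ℕ) => g (i:ℤ)) := by
  induction w with
  | zero => simp [PySem.List.pyRange_one_eq_nil]
  | succ n ih =>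
    rw [show ((n + 1 : ℕ) : ℤ) = (n : ℤ) + 1 by push_cast; ring,
        PySem.List.pyRange_one_succ_right (by positivity), List.range_succ]
    simp [List.flatMap_append, ih]

lemma pv_pyRange_map (n : ℕ) (f : ℤ → ℤ) :
    (PySem.List.pyRange 0 (n:ℤ) 1).map f = (List.range n).map (fun (i : ℕ) => f (i:ℤ)) := by
  induction n with
  | zero => simp [PySem.List.pyRange_one_eq_nil]
  | succ n ih =>
    rw [show ((n + 1 : ℕ) : ℤ) = (n : ℤ) + 1 by push_cast; ring,
        PySem.List.pyRange_one_succ_right (by positivity), List.range_succ]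
    simp [ih]

lemma pv_main (mc ws : Int) (hws : 0 < ws) (hmc : 0 < mc) :
    get_distributed_modules_ownership mc ws = get_distributed_modules_ownership_alt mc ws := by
  obtain ⟨w, rfl⟩ : ∃ w : ℕ, ws = (w:ℤ) := ⟨ws.toNat, by omega⟩
  obtain ⟨m, rfl⟩ : ∃ m : ℕ, mc = (m:ℤ) := ⟨mc.toNat, by omega⟩
  have hw0 : 0 < w := by exact_mod_cast hws
  have hfd : PySem.Int.floordiv (m:ℤ) (w:ℤ) = ((m / w : ℕ) : ℤ) := PySem.Int.floordiv_natCast m w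
  have hmd : PySem.Int.mod (m:ℤ) (w:ℤ) = ((m % w : ℕ) : ℤ) := PySem.Int.mod_natCast m w
  have em : m / w * w + m % w = m := by
    rw [Nat.mul_comm]
    exact Nat.div_add_mod m w
  have hA : get_distributed_modules_ownership (m:ℤ) (w:ℤ)
      = ((List.range m).map (pvOwnerN (m / w) (m % w))).map (fun k : ℕ => (k:ℤ)) := by
    unfold get_distributed_modules_ownership
    rw [PySem.List.foldl_append_eq_flatMap, List.nil_append, pv_pyRange_flatMap]
    have eA : (fun i : ℕ => PySem.List.pyRepeat [(i:ℤ)]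
          (PySem.Int.floordiv (m:ℤ) (w:ℤ) + if (i:ℤ) < PySem.Int.mod (m:ℤ) (w:ℤ) then 1 else 0))
        = fun i : ℕ => (List.replicate (m / w + if i < m % w then 1 else 0) i).map
          (fun k : ℕ => (k:ℤ)) := by
      funext i
      rw [hfd, hmd, PySem.List.pyRepeat_singleton, List.map_replicate]
      congr 1
      by_cases h : i < m % w
      · rw [if_pos (by exact_mod_cast h), if_pos h,
            show ((m / w : ℕ) : ℤ) + 1 = ((m / w + 1 : ℕ) : ℤ) by push_cast; ring,
            Int.toNat_natCast]
      · rw [if_neg (by exact_mod_cast h), if_neg h, add_zero, add_zero, Int.toNat_natCast]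
    rw [eA, ← List.map_flatMap,
        pv_blocks_eq (m / w) w (m % w) (le_of_lt (Nat.mod_lt m hw0)), em]
  have hB : get_distributed_modules_ownership_alt (m:ℤ) (w:ℤ)
      = ((List.range m).map (pvOwnerN (m / w) (m % w))).map (fun k : ℕ => (k:ℤ)) := by
    unfold get_distributed_modules_ownership_alt
    rw [if_neg (by omega), pv_pyRange_map, List.map_map]
    refine List.map_congr_left (fun j _ => ?_)
    simp only [Function.comp_apply, hfd, hmd, pvOwnerN]
    by_cases h : j < m % w * (m / w + 1)
    · have h' : (j:ℤ) < ((m % w : ℕ):ℤ) * (((m / w : ℕ):ℤ) + 1) := by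
        push_cast
        exact_mod_cast h
      rw [if_pos h, if_pos h',
          show ((m / w : ℕ):ℤ) + 1 = ((m / w + 1 : ℕ):ℤ) by push_cast; ring,
          PySem.Int.floordiv_natCast]
    · have h' : ¬ ((j:ℤ) < ((m % w : ℕ):ℤ) * (((m / w : ℕ):ℤ) + 1)) := by
        push_cast
        exact_mod_cast h
      have hle : m % w * (m / w + 1) ≤ j := Nat.not_lt.mp h
      rw [if_neg h, if_neg h',
          show (j:ℤ) - ((m % w : ℕ):ℤ) * (((m / w : ℕ):ℤ) + 1)
              = ((j - m % w * (m / w + 1) : ℕ):ℤ) by push_cast [hle]; ring,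
          PySem.Int.floordiv_natCast]
      push_cast
      ring
  rw [hA, hB]
-- arithmetic helper: a nonpositive value has nonpositive floor quotient by a positive divisor
lemma pv_quot_nonpos (ws d mo : Int) (hws : 0 < ws) (hsum : d * ws + mo ≤ 0) (hm0 : 0 ≤ mo) :
    d ≤ 0 ∧ (0 < mo → d ≤ -1) := by
  have hd0 : d ≤ 0 := by
    by_contra h
    rw [not_le] at h
    have : ws ≤ d * ws := le_mul_of_one_le_left (le_of_lt hws) h
    omega
  refine ⟨hd0, fun hmo => ?_⟩
  rcases eq_or_lt_of_le hd0 with h0 | h0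
  · subst h0
    simp at hsum
    omega
  · omega

lemma pv_nonpos (mc ws : Int) (hws : 0 < ws) (hmc : mc ≤ 0) :
    get_distributed_modules_ownership mc ws = get_distributed_modules_ownership_alt mc ws := by
  have hrhs : get_distributed_modules_ownership_alt mc ws = [] := by
    unfold get_distributed_modules_ownership_alt
    rw [if_neg (by omega), PySem.List.pyRange_one_eq_nil hmc]
    simp
  rw [hrhs]
  unfold get_distributed_modules_ownership
  rw [PySem.List.foldl_append_eq_flatMap]
  rw [List.nil_append]
  rw [List.flatMap_eq_nil_iff.mpr]
  intro i hi
  have hi0 : 0 ≤ i := ((PySem.List.mem_pyRange_one).1 hi).1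
  have hdm := PySem.Int.floordiv_mul_add_mod mc ws
  have hm0 := PySem.Int.mod_nonneg mc hws
  have hml := PySem.Int.mod_lt mc hws
  obtain ⟨hd0, hd1⟩ := pv_quot_nonpos ws (PySem.Int.floordiv mc ws)
    (PySem.Int.mod mc ws) hws (by omega) hm0
  split_ifs with h
  · have hdneg : PySem.Int.floordiv mc ws ≤ -1 := hd1 (by omega)
    rw [PySem.List.pyRepeat_singleton]
    have : (PySem.Int.floordiv mc ws + 1).toNat = 0 := by omega
    rw [this]
    simp
  · rw [PySem.List.pyRepeat_singleton]
    have : (PySem.Int.floordiv mc ws + 0).toNat = 0 := by omega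
    rw [this]
    simp

-- ===== VERDICT (by name: the statement is the Claim_ definition above) =====
theorem get_distributed_modules_ownership_spec : Claim_equal_get_distributed_modules_ownership := by
  intro mc ws _
  unfold Spec_get_distributed_modules_ownership
  rcases le_or_gt ws 0 with hws | hws
  · unfold get_distributed_modules_ownership get_distributed_modules_ownership_alt
    rw [PySem.List.pyRange_one_eq_nil (by omega)]
    simp [hws]
  · rcases le_or_gt mc 0 with hmc | hmc
    · exact pv_nonpos mc ws hws hmc
    · exact pv_main mc ws hws hmc
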